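-- pv_equiv track=rewrite | github.com/itsvineet99/cpp_matmul | tune_nb.py | parse_nb_values
-- ===== SOURCE A (Python) =====
-- def compute_divisors(value: int) -> list[int]:
--     divisors = set()
--     probe = 1
--     while probe * probe <= value:
--         if value % probe == 0:
--             divisors.add(probe)
--             divisors.add(value // probe)
--         probe += 1
--     return sorted(divisors)
--
-- def parse_nb_values(raw_values: str, size: int) -> list[int]:
--     if raw_values.strip():
--         values = []
--         for token in raw_values.split(","):
--             cleaned = token.strip()
--             if not cleaned:
--                 continue
--             values.append(int(cleaned))
--     else:
--         values = compute_divisors(size)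
--
--     unique_values = sorted(set(values))
--     if not unique_values:
--         raise ValueError("No NB values were provided.")
--
--     invalid_values = [value for value in unique_values if value <= 0 or size % value != 0]
--     if invalid_values:
--         joined = ", ".join(str(value) for value in invalid_values)
--         raise ValueError(
--             f"Every NB must be a positive divisor of size={size}. Invalid values: {joined}"
--         )
--
--     return unique_values
-- ===== SOURCE B (Python) =====
-- def parse_nb_values(raw_values: str, size: int) -> list[int]:
--     if raw_values.strip():
--         tokens = [token.strip() for token in raw_values.split(",")]
--         values = [int(token) for token in tokens if token]
--     else:
--         values = _divisors(size)
--
--     unique_values = sorted(set(values))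
--     if not unique_values:
--         raise ValueError("No NB values were provided.")
--
--     invalid_values = [value for value in unique_values if value <= 0 or size % value != 0]
--     if invalid_values:
--         joined = ", ".join(str(value) for value in invalid_values)
--         raise ValueError(
--             f"Every NB must be a positive divisor of size={size}. Invalid values: {joined}"
--         )
--
--     return unique_values
--
--
-- def _divisors(n: int) -> list[int]:
--     # recursive prime-factor peeling: find the smallest prime factor p of n,
--     # recurse on n // p and return D(n//p) + p * D(n//p)
--     if n == 1:
--         return [1]
--     p = 2
--     while p * p <= n and n % p != 0:
--         p += 1
--     if p * p > n:
--         return [1, n]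
--     rest = _divisors(n // p)
--     return rest + [p * d for d in rest if p * d not in rest]
-- ===== Notes on version B (the rewrite author's own statement) =====
-- stated objective: alternative
-- what changed: A's compute_divisors (collect probe/cofactor pairs for every probe up to sqrt(value) into a set, then sort) is replaced by recursive prime-factor peeling: find the smallest prime factor p of n, recurse on n // p, and return D(n//p) plus the new multiples p*d; the token loop with an accumulator becomes a comprehension pipeline.
import Mathlib
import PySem

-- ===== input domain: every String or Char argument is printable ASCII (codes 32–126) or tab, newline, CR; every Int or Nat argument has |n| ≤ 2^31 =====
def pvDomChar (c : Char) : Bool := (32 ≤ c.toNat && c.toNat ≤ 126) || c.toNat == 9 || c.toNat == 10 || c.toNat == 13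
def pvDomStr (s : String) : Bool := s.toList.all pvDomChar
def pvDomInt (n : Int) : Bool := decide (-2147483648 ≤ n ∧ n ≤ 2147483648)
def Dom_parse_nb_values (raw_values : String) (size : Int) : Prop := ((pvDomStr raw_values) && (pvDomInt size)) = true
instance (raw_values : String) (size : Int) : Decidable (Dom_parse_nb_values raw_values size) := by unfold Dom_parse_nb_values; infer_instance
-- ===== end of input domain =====

-- B replaces A's √size pair-collecting divisor scan by recursive prime-factor peeling
-- (find the smallest prime factor p of n, recurse on n // p, return D(n//p) ∪ p·D(n//p))
-- and turns the accumulator token loop into a comprehension pipeline;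
-- Pre_ excludes exactly the inputs where A raises ValueError.

-- ===== PORT A =====
-- while probe * probe <= value: if value % probe == 0: add probe, add value // probe
-- (fuel : Nat is only a totality guard; value.toNat iterations always suffice)
def cdLoop (fuel : Nat) (value probe : Int) (s : PySem.Set Int) : PySem.Set Int :=
  match fuel with
  | 0 => s
  | fuel + 1 =>
    if probe * probe ≤ value then
      cdLoop fuel value (probe + 1)
        (if PySem.Int.mod value probe = 0 then
          PySem.Set.add (PySem.Set.add s probe) (PySem.Int.floordiv value probe)
         else s)
    else s

def compute_divisors (value : Int) : List Int :=
  PySem.List.sorted (cdLoop value.toNat value 1 PySem.Set.empty) (fun x => x) false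

def parse_nb_values (raw_values : String) (size : Int) : List Int :=
  let values : List Int :=
    if PySem.Str.strip raw_values ≠ "" then
      ((PySem.Str.split? raw_values ",").getD []).foldl
        (fun acc token =>
          let cleaned := PySem.Str.strip token
          if cleaned = "" then acc
          else acc ++ [(PySem.Int.ofStr? cleaned).getD 0])  -- int(cleaned); Pre_ excludes none
        []
    else compute_divisors size
  -- the two 'raise ValueError' branches are excluded by Pre_parse_nb_values
  PySem.List.sorted (PySem.Set.ofList values) (fun x => x) false

-- ===== PORT B =====
-- while p * p <= n and n % p != 0: p += 1   (fuel is only a totality guard; n.toNat suffices)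
def sfLoop (fuel : Nat) (n p : Int) : Int :=
  match fuel with
  | 0 => p
  | fuel + 1 =>
    if p * p ≤ n ∧ PySem.Int.mod n p ≠ 0 then sfLoop fuel n (p + 1) else p

-- _divisors: recursive prime-factor peeling (fuel is only a totality guard: the
-- recursion argument n // p is strictly smaller, so n.toNat levels always suffice)
def divsRec (fuel : Nat) (n : Int) : List Int :=
  match fuel with
  | 0 => [1]
  | fuel + 1 =>
    if n = 1 then [1]
    else
      let p := sfLoop n.toNat n 2
      if n < p * p then [1, n]
      else
        let rest := divsRec fuel (PySem.Int.floordiv n p)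
        rest ++ (rest.filter (fun d => !rest.contains (p * d))).map (fun d => p * d)

def parse_nb_values_alt (raw_values : String) (size : Int) : List Int :=
  let values : List Int :=
    if PySem.Str.strip raw_values ≠ "" then
      (((((PySem.Str.split? raw_values ",").getD []).map PySem.Str.strip).filter
          (fun t => t ≠ "")).map (fun t => (PySem.Int.ofStr? t).getD 0))
    else divsRec size.toNat size
  -- the two 'raise ValueError' branches are excluded by Pre_parse_nb_values
  PySem.List.sorted (PySem.Set.ofList values) (fun x => x) false

-- ===== PRECONDITION & SPEC =====
-- Pre_ = exactly the inputs on which A returns: with a non-blank raw string, every non-empty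
-- stripped token parses as an int that is a positive divisor of size and at least one token
-- exists; with a blank raw string, size ≥ 1 (otherwise A raises ValueError).
def Pre_parse_nb_values (raw_values : String) (size : Int) : Prop :=
  if PySem.Str.strip raw_values ≠ "" then
    let toks := (((PySem.Str.split? raw_values ",").getD []).map PySem.Str.strip).filter (fun t => t ≠ "")
    toks ≠ [] ∧ ∀ t ∈ toks, (PySem.Int.ofStr? t).isSome ∧
      1 ≤ (PySem.Int.ofStr? t).getD 0 ∧ PySem.Int.mod size ((PySem.Int.ofStr? t).getD 0) = 0
  else 1 ≤ size
instance (raw_values : String) (size : Int) : Decidable (Pre_parse_nb_values raw_values size) := by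
  unfold Pre_parse_nb_values; infer_instance

def pvWitness_parse_nb_values : String × Int := ("4, 2", 4)

def Spec_parse_nb_values (raw_values : String) (size : Int) (out : List Int) : Prop := out = parse_nb_values_alt raw_values size
instance (raw_values : String) (size : Int) (out : List Int) : Decidable (Spec_parse_nb_values raw_values size out) := by unfold Spec_parse_nb_values; infer_instance

-- ===== CLAIM (what is proved, stated in full; the proofs are below) =====
def Claim_equal_parse_nb_values : Prop := ∀ (raw_values : String) (size : Int), Dom_parse_nb_values raw_values size → Pre_parse_nb_values raw_values size → Spec_parse_nb_values raw_values size (parse_nb_values raw_values size)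

-- ===== LEMMAS AND PROOFS =====

-- membership in A's divisor-collecting loop (probe ≥ 1 throughout the run)
lemma cdLoop_mem (fuel : Nat) (value probe : Int) (s : PySem.Set Int) (a : Int)
    (h1 : 1 ≤ probe) (hf : (value + 1 - probe).toNat ≤ fuel) :
    a ∈ cdLoop fuel value probe s ↔
      a ∈ s ∨ ∃ q, probe ≤ q ∧ q * q ≤ value ∧ PySem.Int.mod value q = 0 ∧
        (a = q ∨ a = PySem.Int.floordiv value q) := by
  induction fuel generalizing probe s with
  | zero =>
    simp only [cdLoop]
    constructor
    · exact Or.inl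
    · rintro (hs | ⟨q, hq1, hq2, hq3, hq4⟩)
      · exact hs
      · have hq : q ≤ q * q := le_mul_of_one_le_left (by omega) (by omega)
        exact absurd hq2 (by omega)
  | succ fuel ih =>
    by_cases h : probe * probe ≤ value
    · have hp : probe ≤ probe * probe := le_mul_of_one_le_left (by omega) h1
      have hpv : probe ≤ value := hp.trans h
      simp only [cdLoop]
      rw [if_pos h, ih (probe + 1) _ (by omega) (by omega)]
      by_cases hm : PySem.Int.mod value probe = 0
      · simp only [if_pos hm, PySem.Set.mem_add]
        constructor
        · rintro (((hs | rfl) | rfl) | ⟨q, hq1, hq2, hq3, hq4⟩)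
          · exact Or.inl hs
          · exact Or.inr ⟨a, le_refl _, h, hm, Or.inl rfl⟩
          · exact Or.inr ⟨probe, le_refl _, h, hm, Or.inr rfl⟩
          · exact Or.inr ⟨q, by omega, hq2, hq3, hq4⟩
        · rintro (hs | ⟨q, hq1, hq2, hq3, hq4⟩)
          · exact Or.inl (Or.inl (Or.inl hs))
          · rcases eq_or_lt_of_le hq1 with rfl | hlt
            · rcases hq4 with rfl | rfl
              · exact Or.inl (Or.inl (Or.inr rfl))
              · exact Or.inl (Or.inr rfl)
            · exact Or.inr ⟨q, by omega, hq2, hq3, hq4⟩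
      · simp only [if_neg hm]
        constructor
        · rintro (hs | ⟨q, hq1, hq2, hq3, hq4⟩)
          · exact Or.inl hs
          · exact Or.inr ⟨q, by omega, hq2, hq3, hq4⟩
        · rintro (hs | ⟨q, hq1, hq2, hq3, hq4⟩)
          · exact Or.inl hs
          · rcases eq_or_lt_of_le hq1 with rfl | hlt
            · exact absurd hq3 hm
            · exact Or.inr ⟨q, by omega, hq2, hq3, hq4⟩
    · simp only [cdLoop]
      rw [if_neg h]
      constructor
      · exact Or.inl
      · rintro (hs | ⟨q, hq1, hq2, hq3, hq4⟩)
        · exact hs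
        · have hle : probe * probe ≤ q * q :=
            mul_le_mul hq1 hq1 (by omega) (by omega)
          exact absurd hq2 (by omega)

-- a pair (probe, cofactor) hit by a sqrt-bounded scan is exactly a divisor in 1..value
lemma pairs_char (value : Int) (hv : 1 ≤ value) (a : Int) :
    (∃ q, 1 ≤ q ∧ q * q ≤ value ∧ PySem.Int.mod value q = 0 ∧
      (a = q ∨ a = PySem.Int.floordiv value q)) ↔
      1 ≤ a ∧ a ≤ value ∧ PySem.Int.mod value a = 0 := by
  constructor
  · rintro ⟨q, hq1, hq2, hq3, hq4⟩
    rw [PySem.Int.mod_eq_zero_iff_dvd] at hq3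
    obtain ⟨c, hc⟩ := hq3
    have hqv : q ≤ value := by nlinarith
    have hc1 : 1 ≤ c := by nlinarith
    have hfd : PySem.Int.floordiv value q = c := by
      rw [PySem.Int.floordiv_eq_ediv_of_pos (by omega), hc, Int.mul_ediv_cancel_left _ (by omega)]
    rcases hq4 with rfl | rfl
    · exact ⟨hq1, hqv, by rw [PySem.Int.mod_eq_zero_iff_dvd]; exact ⟨c, hc⟩⟩
    · rw [hfd]
      refine ⟨hc1, by nlinarith, ?_⟩
      rw [PySem.Int.mod_eq_zero_iff_dvd]
      exact ⟨q, by linarith [hc, mul_comm q c]⟩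
  · rintro ⟨ha1, hav, hmod⟩
    rw [PySem.Int.mod_eq_zero_iff_dvd] at hmod
    obtain ⟨b, hb⟩ := hmod
    have hb1 : 1 ≤ b := by nlinarith
    by_cases hsq : a * a ≤ value
    · exact ⟨a, ha1, hsq, by rw [PySem.Int.mod_eq_zero_iff_dvd]; exact ⟨b, hb⟩, Or.inl rfl⟩
    · refine ⟨b, hb1, by nlinarith, ?_, Or.inr ?_⟩
      · rw [PySem.Int.mod_eq_zero_iff_dvd]; exact ⟨a, by linarith [hb, mul_comm a b]⟩
      · rw [PySem.Int.floordiv_eq_ediv_of_pos (by omega), hb, mul_comm a b,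
          Int.mul_ediv_cancel_left _ (by omega)]

lemma cdLoop_char (value : Int) (hv : 1 ≤ value) (a : Int) :
    a ∈ cdLoop value.toNat value 1 PySem.Set.empty ↔
      1 ≤ a ∧ a ≤ value ∧ PySem.Int.mod value a = 0 := by
  rw [cdLoop_mem value.toNat value 1 PySem.Set.empty a (le_refl 1) (by omega)]
  simp only [PySem.Set.empty, List.not_mem_nil, false_or]
  exact pairs_char value hv a

-- B's smallest-factor scan: everything in [2, result) is a non-divisor, and the
-- result is past √n or a divisor
lemma sfLoop_spec (fuel : Nat) (n p : Int) (h2 : 2 ≤ p) (hf : (n + 1 - p).toNat ≤ fuel) :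
    p ≤ sfLoop fuel n p ∧
    (∀ q, p ≤ q → q < sfLoop fuel n p → PySem.Int.mod n q ≠ 0) ∧
    (n < sfLoop fuel n p * sfLoop fuel n p ∨ PySem.Int.mod n (sfLoop fuel n p) = 0) := by
  induction fuel generalizing p with
  | zero =>
    have hnp : n < p := by omega
    have : p ≤ p * p := le_mul_of_one_le_left (by omega) (by omega)
    simp only [sfLoop]
    exact ⟨le_refl _, fun q hq1 hq2 => absurd hq2 (by omega), Or.inl (by omega)⟩
  | succ fuel ih =>
    by_cases h : p * p ≤ n ∧ PySem.Int.mod n p ≠ 0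
    · have hp : p ≤ p * p := le_mul_of_one_le_left (by omega) (by omega)
      have hpn : p ≤ n := hp.trans h.1
      obtain ⟨ih1, ih2, ih3⟩ := ih (p + 1) (by omega) (by omega)
      simp only [sfLoop]
      rw [if_pos h]
      refine ⟨by omega, fun q hq1 hq2 => ?_, ih3⟩
      rcases eq_or_lt_of_le hq1 with rfl | hlt
      · exact h.2
      · exact ih2 q (by omega) hq2
    · simp only [sfLoop]
      rw [if_neg h]
      refine ⟨le_refl _, fun q hq1 hq2 => absurd hq2 (by omega), ?_⟩
      rcases not_and_or.mp h with h1 | h1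
      · exact Or.inl (by omega)
      · exact Or.inr (not_not.mp h1)

-- divisors of p * m for p prime-in-context: D(p*m) = D(m) ∪ p·D(m)
lemma dvd_mul_prime_iff (p m a : Int) (hp : 2 ≤ p)
    (hprime : ∀ q, 2 ≤ q → q ∣ p → q ∣ p * m → q = p)
    (ha : 1 ≤ a) :
    a ∣ p * m ↔ a ∣ m ∨ ∃ d, 1 ≤ d ∧ d ∣ m ∧ a = p * d := by
  constructor
  · intro hdvd
    by_cases hpa : p ∣ a
    · obtain ⟨b, rfl⟩ := hpa
      have hb1 : 1 ≤ b := by nlinarith [mul_pos (by omega : (0:Int) < p) (by nlinarith : (0:Int) < b)]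
      refine Or.inr ⟨b, ?_, ?_, rfl⟩
      · nlinarith
      · exact (mul_dvd_mul_iff_left (by omega : p ≠ 0)).mp hdvd
    · -- p does not divide a: a is coprime to p, hence divides m
      left
      have hPP : p.natAbs.Prime := by
        rw [Nat.prime_def_lt]
        refine ⟨by omega, fun q hq hqd => ?_⟩
        by_contra hq1
        have hq0 : q ≠ 0 := by
          rintro rfl
          simp only [Nat.zero_dvd] at hqd
          omega
        have h2q : 2 ≤ (q : Int) := by omega
        have hqp : (q : Int) ∣ p := by
          have := Int.natCast_dvd_natCast.mpr hqd
          rwa [Int.dvd_natAbs] at this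
        have := hprime q h2q hqp (hqp.trans ⟨m, rfl⟩)
        omega
      have hco : (a.natAbs).Coprime p.natAbs := by
        rw [Nat.coprime_comm]
        refine (Nat.Prime.coprime_iff_not_dvd hPP).mpr fun hd => hpa ?_
        have := Int.natCast_dvd_natCast.mpr hd
        rwa [Int.natAbs_dvd, Int.dvd_natAbs] at this
      have hnat : a.natAbs ∣ p.natAbs * m.natAbs := by
        rw [← Int.natAbs_mul]
        exact Int.natAbs_dvd_natAbs.mpr hdvd
      have := hco.dvd_of_dvd_mul_left hnat
      exact Int.natAbs_dvd_natAbs.mp this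
  · rintro (hdvd | ⟨d, hd1, hdm, rfl⟩)
    · exact hdvd.mul_left p
    · exact mul_dvd_mul_left p hdm
-- membership in B's recursive divisor list = positive divisors
lemma divsRec_char : ∀ (fuel : Nat) (n : Int), 1 ≤ n → n.toNat ≤ fuel → ∀ (a : Int),
    a ∈ divsRec fuel n ↔ 1 ≤ a ∧ a ∣ n := by
  intro fuel
  induction fuel with
  | zero => intro n hn hf a; exact absurd hf (by omega)
  | succ fuel ih =>
    intro n hn hf a
    by_cases h1 : n = 1
    · subst h1
      rw [show divsRec (fuel + 1) 1 = [1] from by simp [divsRec]]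
      simp only [List.mem_singleton]
      constructor
      · rintro rfl; exact ⟨le_refl _, dvd_refl _⟩
      · rintro ⟨ha, hd⟩; exact Int.eq_one_of_dvd_one (by omega) hd
    · have hn2 : 2 ≤ n := by omega
      obtain ⟨hsp1, hsp2, hsp3⟩ := sfLoop_spec n.toNat n 2 (le_refl _) (by omega)
      set p := sfLoop n.toNat n 2 with hpdef
      simp only [divsRec, if_neg h1]
      rw [← hpdef]
      by_cases hbig : n < p * p
      · rw [if_pos hbig]
        simp only [List.mem_cons, List.not_mem_nil, or_false]
        constructor
        · rintro (rfl | rfl)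
          · exact ⟨le_refl _, one_dvd _⟩
          · exact ⟨by omega, dvd_refl _⟩
        · rintro ⟨ha, hd⟩
          by_contra hcon
          simp only [not_or] at hcon
          obtain ⟨hne1, hnen⟩ := hcon
          have hd' := hd
          obtain ⟨b, hb⟩ := hd'
          have han : a ≤ n := Int.le_of_dvd (by omega) hd
          have ha2 : 2 ≤ a := by omega
          have hb1 : 1 ≤ b := by nlinarith
          have hb2 : 2 ≤ b := by
            by_contra hc
            have hb1' : b = 1 := by omega
            subst hb1'
            simp only [mul_one] at hb
            omega
          have hbn : b ∣ n := ⟨a, by linarith [hb, mul_comm a b]⟩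
          by_cases hsq : a * a ≤ n
          · exact hsp2 a ha2 (by nlinarith) ((PySem.Int.mod_eq_zero_iff_dvd n a).mpr hd)
          · have hba : b < a := by nlinarith
            have hbb : b * b ≤ n := by nlinarith
            exact hsp2 b hb2 (by nlinarith) ((PySem.Int.mod_eq_zero_iff_dvd n b).mpr hbn)
      · rw [if_neg hbig]
        have hpn : p ∣ n := by
          rcases hsp3 with h | h
          · omega
          · exact (PySem.Int.mod_eq_zero_iff_dvd n p).mp h
        obtain ⟨m, hm⟩ := hpn
        have hm1 : 1 ≤ m := by nlinarith
        have hfd : PySem.Int.floordiv n p = m := by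
          rw [PySem.Int.floordiv_eq_ediv_of_pos (by omega), hm,
            Int.mul_ediv_cancel_left _ (by omega)]
        have hmn : m < n := by nlinarith
        rw [hfd]
        have ihm := ih m hm1 (by omega)
        have hprime : ∀ q, 2 ≤ q → q ∣ p → q ∣ p * m → q = p := by
          intro q hq2 hqp hqn
          have hqmod : PySem.Int.mod n q = 0 :=
            (PySem.Int.mod_eq_zero_iff_dvd n q).mpr (by rw [hm]; exact hqn)
          have hqlep : q ≤ p := Int.le_of_dvd (by omega) hqp
          rcases eq_or_lt_of_le hqlep with h | h
          · exact h
          · exact absurd hqmod (hsp2 q hq2 h)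
        constructor
        · intro hmem
          rw [List.mem_append] at hmem
          rcases hmem with hmem | hmem
          · obtain ⟨ha1, had⟩ := (ihm a).mp hmem
            refine ⟨ha1, ?_⟩
            rw [hm]
            exact had.mul_left p
          · simp only [List.mem_map, List.mem_filter] at hmem
            obtain ⟨d, ⟨hdmem, _⟩, rfl⟩ := hmem
            obtain ⟨hd1, hdd⟩ := (ihm d).mp hdmem
            refine ⟨by nlinarith, ?_⟩
            rw [hm]
            exact mul_dvd_mul_left p hdd
        · rintro ⟨ha1, had⟩
          rw [hm] at had
          rcases (dvd_mul_prime_iff p m a (by omega) hprime ha1).mp had with h | ⟨d, hd1, hdm, rfl⟩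
          · exact List.mem_append.mpr (Or.inl ((ihm a).mpr ⟨ha1, h⟩))
          · have hdrest : d ∈ divsRec fuel m := (ihm d).mpr ⟨hd1, hdm⟩
            by_cases hin : p * d ∈ divsRec fuel m
            · exact List.mem_append.mpr (Or.inl hin)
            · refine List.mem_append.mpr (Or.inr ?_)
              simp only [List.mem_map, List.mem_filter, Bool.not_eq_eq_eq_not, Bool.not_true,
                List.contains_eq_mem, decide_eq_false_iff_not]
              exact ⟨d, ⟨hdrest, hin⟩, rfl⟩

lemma divsRec_top_char (n : Int) (hn : 1 ≤ n) (a : Int) :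
    a ∈ divsRec n.toNat n ↔ 1 ≤ a ∧ a ≤ n ∧ PySem.Int.mod n a = 0 := by
  rw [divsRec_char n.toNat n hn (le_refl _) a]
  constructor
  · rintro ⟨h1, h2⟩
    exact ⟨h1, Int.le_of_dvd (by omega) h2, (PySem.Int.mod_eq_zero_iff_dvd n a).mpr h2⟩
  · rintro ⟨h1, h2, h3⟩
    exact ⟨h1, (PySem.Int.mod_eq_zero_iff_dvd n a).mp h3⟩

-- A's token loop equals B's comprehension pipeline
lemma token_fold_eq (l : List String) (acc : List Int) :
    l.foldl (fun acc token =>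
        let cleaned := PySem.Str.strip token
        if cleaned = "" then acc else acc ++ [(PySem.Int.ofStr? cleaned).getD 0]) acc
    = acc ++ ((l.map PySem.Str.strip).filter (fun t => t ≠ "")).map
        (fun t => (PySem.Int.ofStr? t).getD 0) := by
  induction l generalizing acc with
  | nil => simp
  | cons x t ih =>
    by_cases h : PySem.Str.strip x = "" <;>
      simp [List.foldl_cons, h, ih, List.append_assoc]

-- ===== VERDICT (by name: the statement is the Claim_ definition above) =====
theorem parse_nb_values_spec : Claim_equal_parse_nb_values := by
  intro raw_values size _hdom hpre
  unfold Spec_parse_nb_values parse_nb_values parse_nb_values_alt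
  by_cases hs : PySem.Str.strip raw_values ≠ ""
  · simp only [if_pos hs]
    rw [token_fold_eq, List.nil_append]
  · simp only [if_neg hs]
    unfold Pre_parse_nb_values at hpre
    rw [if_neg hs] at hpre
    unfold compute_divisors
    apply PySem.List.sorted_eq_sorted_of_perm _ _ _ (fun a b h => h)
    apply (List.perm_ext_iff_of_nodup (PySem.Set.nodup_ofList _) (PySem.Set.nodup_ofList _)).mpr
    intro a
    rw [PySem.Set.mem_ofList, PySem.Set.mem_ofList, PySem.List.mem_sorted,
      cdLoop_char size hpre a, divsRec_top_char size hpre a]
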